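-- pv_equiv track=rewrite | github.com/Juans-ochoa/code-signal | intro/10.py | solution
-- ===== SOURCE A (Python) =====
-- def solution(str1: str, str2: str):
--     dict_word = {}
--     for s1 in str1:
--         if (s1 in str2 and dict_word.get(s1) is None):
--             dict_word[s1] = min([str1.count(s1), str2.count(s1)])
--     acc = 0
--     for i in dict_word:
--         acc += dict_word[i]
--     return acc
-- ===== SOURCE B (Python) =====
-- def solution(str1: str, str2: str):
--     a = sorted(str1)
--     b = sorted(str2)
--     i = j = acc = 0
--     while i < len(a) and j < len(b):
--         if a[i] == b[j]:
--             acc += 1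
--             i += 1
--             j += 1
--         elif a[i] < b[j]:
--             i += 1
--         else:
--             j += 1
--     return acc
-- ===== Notes on version B (the rewrite author's own statement) =====
-- stated objective: alternative
-- what changed: Replaced the dict of per-character minimum counts (membership test plus two full .count scans per character) by sorting both strings and counting common characters with a two-pointer merge of the sorted sequences.
import Mathlib
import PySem

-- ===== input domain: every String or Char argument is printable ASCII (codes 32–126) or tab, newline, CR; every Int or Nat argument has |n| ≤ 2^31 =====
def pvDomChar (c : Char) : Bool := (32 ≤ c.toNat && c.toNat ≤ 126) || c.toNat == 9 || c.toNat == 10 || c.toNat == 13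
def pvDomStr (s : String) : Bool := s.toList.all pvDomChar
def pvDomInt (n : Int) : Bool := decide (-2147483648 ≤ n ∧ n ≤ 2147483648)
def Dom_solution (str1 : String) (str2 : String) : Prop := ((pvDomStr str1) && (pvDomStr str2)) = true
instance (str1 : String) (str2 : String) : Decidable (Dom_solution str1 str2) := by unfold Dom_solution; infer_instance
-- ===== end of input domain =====

-- B replaces A's dict of minimum counts (with repeated full-string .count scans) by sorting
-- both strings and counting matches with a two-pointer merge; objective: alternative algorithm.

-- ===== PORT A =====
-- literal transliteration of A: build dict of min counts over str1's chars, then sum its values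
def solution (str1 : String) (str2 : String) : Int :=
  let l1 := str1.toList
  let l2 := str2.toList
  let d : PySem.Dict Char Int := l1.foldl (fun d c =>
      if PySem.Chars.isIn [c] l2 && (d.get? c).isNone then
        d.insert c (min ((PySem.Chars.count l1 [c] : Int)) ((PySem.Chars.count l2 [c] : Int)))
      else d)
    PySem.Dict.empty
  d.keys.foldl (fun acc k => acc + (d.get? k).getD 0) 0

-- ===== PORT B =====
-- the while-loop of Source B: two pointers into the two sorted arrays, modelled as the two suffixes
def solutionAltGo : List Char → List Char → Int
  | [], _ => 0
  | _ :: _, [] => 0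
  | a :: as, b :: bs =>
    if a = b then 1 + solutionAltGo as bs
    else if a < b then solutionAltGo as (b :: bs)
    else solutionAltGo (a :: as) bs
termination_by a b => a.length + b.length

def solution_alt (str1 : String) (str2 : String) : Int :=
  solutionAltGo (PySem.List.sorted str1.toList id) (PySem.List.sorted str2.toList id)

-- ===== PRECONDITION & SPEC =====
def Spec_solution (str1 : String) (str2 : String) (out : Int) : Prop := out = solution_alt str1 str2
instance (str1 : String) (str2 : String) (out : Int) : Decidable (Spec_solution str1 str2 out) := by unfold Spec_solution; infer_instance

-- ===== CLAIM (what is proved, stated in full; the proofs are below) =====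
def Claim_equal_solution : Prop := ∀ (str1 : String) (str2 : String), Dom_solution str1 str2 → Spec_solution str1 str2 (solution str1 str2)

-- ===== LEMMAS AND PROOFS =====

-- str.count with a single-character needle is the character count
theorem count_go_single (c : Char) : ∀ (l : List Char) (fuel acc : Nat), l.length ≤ fuel →
    PySem.Chars.count.go [c] fuel l acc = acc + l.count c := by
  intro l
  induction l with
  | nil => intro fuel acc _; cases fuel <;> simp [PySem.Chars.count.go]
  | cons x t ih =>
    intro fuel acc h
    cases fuel with
    | zero => simp at h
    | succ f =>
      by_cases hx : c = x
      · subst hx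
        simp only [PySem.Chars.count.go, List.isPrefixOf, BEq.rfl, Bool.and_self, if_pos,
          List.length_singleton, List.drop_succ_cons, List.drop_zero]
        rw [ih f (acc + 1) (by simpa using h)]
        simp
        omega
      · have hpre : List.isPrefixOf [c] (x :: t) = false := by
          simp [List.isPrefixOf, hx]
        simp only [PySem.Chars.count.go, hpre, if_neg, Bool.false_eq_true, not_false_iff]
        rw [ih f acc (by simp at h ⊢; omega)]
        simp [List.count_cons]
        exact fun h' => hx h'.symm

theorem count_single (c : Char) (l : List Char) :
    PySem.Chars.count l [c] = l.count c := by
  simp only [PySem.Chars.count, List.isEmpty_cons, if_neg, Bool.false_eq_true, not_false_iff]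
  simpa using count_go_single c l l.length 0 le_rfl

-- intersection absorbs a cons whose element the other side lacks
theorem cons_inter_notMem_right (a : Char) (m1 m2 : Multiset Char) (h : a ∉ m2) :
    (a ::ₘ m1) ∩ m2 = m1 ∩ m2 := by
  ext c
  by_cases hc : c = a
  · subst hc
    simp [Multiset.count_inter, Multiset.count_cons_self, Multiset.count_eq_zero_of_notMem h]
  · simp [Multiset.count_inter, Multiset.count_cons_of_ne hc]

theorem cons_inter_notMem_left (a : Char) (m1 m2 : Multiset Char) (h : a ∉ m1) :
    m1 ∩ (a ::ₘ m2) = m1 ∩ m2 := by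
  ext c
  by_cases hc : c = a
  · subst hc
    simp [Multiset.count_inter, Multiset.count_eq_zero_of_notMem h]
  · simp [Multiset.count_inter, Multiset.count_cons_of_ne hc]

-- B-side: the two-pointer merge on sorted lists computes the multiset-intersection size
theorem go_eq_inter_card : ∀ (a b : List Char), a.Pairwise (· ≤ ·) → b.Pairwise (· ≤ ·) →
    solutionAltGo a b = ((↑a ∩ ↑b : Multiset Char).card : Int) := by
  intro a b
  induction a, b using solutionAltGo.induct with
  | case1 b => simp [solutionAltGo]
  | case2 x xs => simp [solutionAltGo]
  | case3 xs x ys ih =>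
    intro ha hb
    rw [solutionAltGo, if_pos rfl, ih (List.Pairwise.of_cons ha) (List.Pairwise.of_cons hb)]
    rw [show ((x :: xs : List Char) : Multiset Char) = x ::ₘ ↑xs from rfl,
        show ((x :: ys : List Char) : Multiset Char) = x ::ₘ ↑ys from rfl,
        ← Multiset.cons_inter_distrib]
    simp
    ring
  | case4 x xs y ys hne hlt ih =>
    intro ha hb
    have hy : x ∉ ((y :: ys : List Char) : Multiset Char) := by
      simp only [Multiset.mem_coe, List.mem_cons]
      rintro (h | h)
      · exact hne h
      · exact lt_irrefl x (hlt.trans_le (List.rel_of_pairwise_cons hb h))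
    rw [solutionAltGo, if_neg hne, if_pos hlt, ih (List.Pairwise.of_cons ha) hb]
    rw [show ((x :: xs : List Char) : Multiset Char) = x ::ₘ ↑xs from rfl,
        cons_inter_notMem_right x _ _ hy]
  | case5 x xs y ys hne hnlt ih =>
    intro ha hb
    have hyx : y < x := lt_of_le_of_ne (not_lt.mp hnlt) (fun h => hne h.symm)
    have hy : y ∉ ((x :: xs : List Char) : Multiset Char) := by
      simp only [Multiset.mem_coe, List.mem_cons]
      rintro (h | h)
      · exact hne h.symm
      · exact lt_irrefl y (hyx.trans_le (List.rel_of_pairwise_cons ha h))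
    rw [solutionAltGo, if_neg hne, if_neg hnlt, ih ha (List.Pairwise.of_cons hb)]
    rw [show ((y :: ys : List Char) : Multiset Char) = y ::ₘ ↑ys from rfl,
        cons_inter_notMem_left y _ _ hy]

-- A-side: invariant of the dict-building loop
theorem dict_loop_inv (l2 : List Char) (f : Char → Int) :
    ∀ (l : List Char) (d : PySem.Dict Char Int), d.keys.Nodup →
    (∀ c ∈ d.keys, c ∈ l2) →
    ((l.foldl (fun d c =>
      if PySem.Chars.isIn [c] l2 && (d.get? c).isNone then d.insert c (f c) else d) d).keys.Nodup ∧
     (∀ c, c ∈ (l.foldl (fun d c =>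
      if PySem.Chars.isIn [c] l2 && (d.get? c).isNone then d.insert c (f c) else d) d).keys ↔ c ∈ d.keys ∨ (c ∈ l ∧ c ∈ l2)) ∧
     (∀ c ∈ (l.foldl (fun d c =>
      if PySem.Chars.isIn [c] l2 && (d.get? c).isNone then d.insert c (f c) else d) d).keys, c ∉ d.keys →
        (l.foldl (fun d c =>
      if PySem.Chars.isIn [c] l2 && (d.get? c).isNone then d.insert c (f c) else d) d).getD c 0 = f c) ∧
     (∀ c ∈ d.keys, (l.foldl (fun d c =>
      if PySem.Chars.isIn [c] l2 && (d.get? c).isNone then d.insert c (f c) else d) d).getD c 0 = d.getD c 0)) := by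
  intro l
  induction l with
  | nil => intro d hnd hsub; exact ⟨hnd, by simp, fun c hc hn => absurd hc hn, by simp⟩
  | cons x t ih =>
    intro d hnd hsub
    simp only [List.foldl_cons]
    by_cases hcond : (PySem.Chars.isIn [x] l2 && (d.get? x).isNone) = true
    · have hx2 : x ∈ l2 := by
        have := (Bool.and_eq_true ..).mp hcond |>.1
        rw [PySem.Chars.isIn_iff_infix] at this
        exact (List.singleton_infix_iff x l2).mp this
      have hxnone : d.get? x = none := by
        have := (Bool.and_eq_true ..).mp hcond |>.2
        exact Option.isNone_iff_eq_none.mp this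
      have hxnotmem : x ∉ d.keys := PySem.Dict.get?_eq_none_iff_not_mem_keys d x |>.mp hxnone
      have hcont : d.contains x = false := by
        rw [PySem.Dict.contains_eq_isSome_get?, hxnone]; rfl
      have hkeys : (d.insert x (f x)).keys = d.keys ++ [x] :=
        PySem.Dict.keys_insert_of_not_contains d (f x) hcont
      have hnd' : (d.insert x (f x)).keys.Nodup := by
        rw [hkeys]
        simp [List.nodup_append, hnd]
        exact fun a ha he => hxnotmem (he ▸ ha)
      have hsub' : ∀ c ∈ (d.insert x (f x)).keys, c ∈ l2 := by
        intro c hc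
        rw [hkeys] at hc
        rcases List.mem_append.mp hc with h | h
        · exact hsub c h
        · simp at h; subst h; exact hx2
      obtain ⟨H1, H2, H3, H4⟩ := ih (d.insert x (f x)) hnd' hsub'
      rw [hcond]
      simp only [if_pos]
      refine ⟨H1, ?_, ?_, ?_⟩
      · intro c
        rw [H2 c, hkeys]
        simp only [List.mem_append, List.mem_cons, List.not_mem_nil, or_false]
        constructor
        · rintro (⟨h | h⟩ | ⟨h1, h2⟩)
          · exact Or.inl h
          · exact Or.inr ⟨Or.inl h, h ▸ hx2⟩
          · exact Or.inr ⟨Or.inr h1, h2⟩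
        · rintro (h | ⟨h1 | h1, h2⟩)
          · exact Or.inl (Or.inl h)
          · exact Or.inl (Or.inr h1)
          · exact Or.inr ⟨h1, h2⟩
      · intro c hc hcnot
        by_cases hcx : c = x
        · have hm : c ∈ (d.insert x (f x)).keys := by rw [hkeys, hcx]; simp
          rw [H4 c hm, hcx, PySem.Dict.getD_insert_self d x (f x) 0]
        · refine H3 c hc ?_
          rw [hkeys]; simp [hcnot, hcx]
      · intro c hc
        rw [H4 c (by rw [hkeys]; simp [hc])]
        have hcx : c ≠ x := fun h => hxnotmem (h ▸ hc)
        rw [PySem.Dict.getD_insert_of_ne d (f x) 0 hcx]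
    · obtain ⟨H1, H2, H3, H4⟩ := ih d hnd hsub
      rw [Bool.not_eq_true] at hcond
      rw [hcond]
      simp only [Bool.false_eq_true, if_neg, not_false_iff]
      refine ⟨H1, ?_, H3, H4⟩
      intro c
      rw [H2 c]
      simp only [List.mem_cons]
      constructor
      · rintro (h | ⟨h1, h2⟩)
        · exact Or.inl h
        · exact Or.inr ⟨Or.inr h1, h2⟩
      · rintro (h | ⟨h1 | h1, h2⟩)
        · exact Or.inl h
        · subst h1
          left
          have : ¬ (d.get? c).isNone = true := by
            intro hno
            apply absurd hcond
            simp [hno]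
            rw [PySem.Chars.isIn_iff_infix]
            exact (List.singleton_infix_iff c l2).mpr h2
          rw [← PySem.Dict.contains_iff_mem_keys, PySem.Dict.contains_eq_isSome_get?]
          cases hg : d.get? c with
          | none => exact absurd (by rw [hg]; rfl) this
          | some v => rfl
        · exact Or.inr ⟨h1, h2⟩

-- the multiset-intersection size as the Finset sum of per-character minima
theorem card_inter_eq_sum (l1 l2 : List Char) :
    (((l1 : Multiset Char) ∩ (l2 : Multiset Char)).card : Int)
      = ∑ a ∈ l1.toFinset ∩ l2.toFinset, min ((l1.count a : Int)) ((l2.count a : Int)) := by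
  rw [← Multiset.toFinset_sum_count_eq ((l1 : Multiset Char) ∩ (l2 : Multiset Char))]
  rw [Multiset.toFinset_inter]
  push_cast
  refine Finset.sum_congr (by rw [List.toFinset_coe, List.toFinset_coe]) ?_
  intro a _
  rw [Multiset.count_inter, Multiset.coe_count, Multiset.coe_count]
  push_cast
  rfl

-- A's value, written as the same Finset sum
theorem solution_eq_sum (str1 str2 : String) :
    solution str1 str2
      = ∑ a ∈ str1.toList.toFinset ∩ str2.toList.toFinset,
          min ((str1.toList.count a : Int)) ((str2.toList.count a : Int)) := by
  unfold solution
  simp only [count_single]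
  set l1 := str1.toList
  set l2 := str2.toList
  set f : Char → Int := fun c => min ((l1.count c : Int)) ((l2.count c : Int)) with hf
  obtain ⟨H1, H2, H3, H4⟩ := dict_loop_inv l2 f l1 PySem.Dict.empty (by simp) (by simp)
  set R := l1.foldl (fun d c =>
    if PySem.Chars.isIn [c] l2 && (d.get? c).isNone then d.insert c (f c) else d)
    PySem.Dict.empty with hR
  have hsum : R.keys.foldl (fun acc k => acc + (R.get? k).getD 0) 0 = (R.keys.map f).sum := by
    rw [show (fun (acc : Int) (k : Char) => acc + (R.get? k).getD 0)
          = fun acc k => acc + R.getD k 0 from by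
        funext acc k; rw [PySem.Dict.getD_eq_get?_getD]]
    rw [PySem.List.foldl_add R.keys (fun k => R.getD k 0) 0, zero_add]
    congr 1
    refine List.map_congr_left ?_
    intro c hc
    exact H3 c hc (by simp)
  rw [hsum]
  rw [← List.sum_toFinset f H1]
  refine Finset.sum_congr ?_ (fun _ _ => rfl)
  ext a
  simp only [List.mem_toFinset, Finset.mem_inter]
  rw [H2 a]
  simp

-- ===== VERDICT (by name: the statement is the Claim_ definition above) =====
theorem solution_spec : Claim_equal_solution := by
  intro str1 str2 _
  unfold Spec_solution solution_alt
  have hp1 : (PySem.List.sorted str1.toList id).Pairwise (· ≤ ·) :=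
    PySem.List.sorted_pairwise str1.toList id
  have hp2 : (PySem.List.sorted str2.toList id).Pairwise (· ≤ ·) :=
    PySem.List.sorted_pairwise str2.toList id
  rw [go_eq_inter_card _ _ hp1 hp2,
      Multiset.coe_eq_coe.mpr (PySem.List.sorted_perm str1.toList id false),
      Multiset.coe_eq_coe.mpr (PySem.List.sorted_perm str2.toList id false),
      card_inter_eq_sum, ← solution_eq_sum]
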